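-- pv_equiv track=rewrite | github.com/PermutaTriangle/Tilings | tilings/strategies/factor.py | interleaving_rows_and_cols
-- ===== SOURCE A (Python) =====
-- from typing import (
--     Callable,
--     Dict,
--     Iterable,
--     Iterator,
--     List,
--     Optional,
--     Set,
--     Tuple,
--     Union,
--     cast,
-- )
--
-- Cell = Tuple[int, int]
--
-- def interleaving_rows_and_cols(
--     partition: Tuple[Tuple[Cell, ...], ...]
-- ) -> Tuple[Set[int], Set[int]]:
--     """
--     Return the set of cols and the set of rows that are being interleaved when
--     factoring with partition.
--     """
--     cols: Set[int] = set()
--     rows: Set[int] = set()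
--     x_seen: Set[int] = set()
--     y_seen: Set[int] = set()
--     for part in partition:
--         cols.update(x for x, _ in part if x in x_seen)
--         rows.update(y for _, y in part if y in y_seen)
--         x_seen.update(x for x, _ in part)
--         y_seen.update(y for _, y in part)
--     return cols, rows
-- ===== SOURCE B (Python) =====
-- def interleaving_rows_and_cols(partition):
--     """Stateless prefix-count formulation: a coordinate belongs to the result
--     exactly at the part where the number of prefix parts containing it first
--     reaches 2; no seen-sets or counters are carried between parts."""
--     def nx(v, upto):
--         return sum(any(x == v for x, _ in part) for part in partition[:upto])
--
--     def ny(v, upto):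
--         return sum(any(y == v for _, y in part) for part in partition[:upto])
--
--     cols = {x for i, part in enumerate(partition) for x, _ in part if nx(x, i + 1) == 2}
--     rows = {y for i, part in enumerate(partition) for _, y in part if ny(y, i + 1) == 2}
--     return cols, rows
-- ===== Notes on version B (the rewrite author's own statement) =====
-- stated objective: alternative
-- what changed: Replaces A's incremental seen-set state carried across the loop by a stateless prefix-count formulation: a coordinate is emitted at part i exactly when the number of parts among partition[:i+1] containing it equals 2, recomputed from scratch by nested scans, so no x_seen/y_seen bookkeeping exists at all.
import Mathlib
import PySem

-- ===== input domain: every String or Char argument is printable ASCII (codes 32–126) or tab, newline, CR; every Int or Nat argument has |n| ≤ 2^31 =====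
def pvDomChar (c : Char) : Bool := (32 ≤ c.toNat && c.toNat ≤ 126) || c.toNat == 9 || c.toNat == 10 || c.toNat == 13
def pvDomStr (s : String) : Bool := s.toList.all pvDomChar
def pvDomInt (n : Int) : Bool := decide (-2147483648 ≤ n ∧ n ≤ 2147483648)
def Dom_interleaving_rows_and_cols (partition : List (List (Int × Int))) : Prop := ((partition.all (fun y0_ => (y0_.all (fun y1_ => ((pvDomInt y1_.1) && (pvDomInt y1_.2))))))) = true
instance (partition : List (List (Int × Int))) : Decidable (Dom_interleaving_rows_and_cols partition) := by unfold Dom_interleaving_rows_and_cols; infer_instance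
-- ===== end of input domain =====

-- B replaces A's incremental seen-set state by a stateless prefix-count formulation:
-- a coordinate is emitted at part i iff the number of parts among partition[:i+1]
-- containing it equals 2, recomputed by nested scans (objective: alternative).

-- ===== PORT A =====
-- state of A's loop, grouped by axis: ((cols, x_seen), (rows, y_seen));
-- cols/rows are updated from the OLD x_seen/y_seen, as in the Python.
def interleaving_rows_and_cols (partition : List (List (Int × Int))) : List Int × List Int :=
  let st := partition.foldl
    (fun (st : (PySem.Set Int × PySem.Set Int) × (PySem.Set Int × PySem.Set Int)) part =>
      ((PySem.Set.update st.1.1 ((part.filter (fun p => PySem.Set.contains st.1.2 p.1)).map Prod.fst),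
        PySem.Set.update st.1.2 (part.map Prod.fst)),
       (PySem.Set.update st.2.1 ((part.filter (fun p => PySem.Set.contains st.2.2 p.2)).map Prod.snd),
        PySem.Set.update st.2.2 (part.map Prod.snd))))
    ((PySem.Set.empty, PySem.Set.empty), (PySem.Set.empty, PySem.Set.empty))
  (st.1.1, st.2.1)

-- ===== PORT B =====
-- nx/ny of Source B: number of parts of partition[:upto] containing the coordinate
-- (sum of booleans = countP; partition[:upto] is PySem.List.slice).
def pvNf (f : Int × Int → Int) (partition : List (List (Int × Int))) (v upto : Int) : Int :=
  ((PySem.List.slice partition none (some upto)).countP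
    (fun part => part.any (fun c => f c == v)) : Int)

-- the two set comprehensions over enumerate(partition)
def interleaving_rows_and_cols_alt (partition : List (List (Int × Int))) : List Int × List Int :=
  ((PySem.List.enumerate partition 0).foldl
     (fun (s : PySem.Set Int) ip =>
        ip.2.foldl (fun s c =>
          if pvNf Prod.fst partition c.1 (ip.1 + 1) = 2 then PySem.Set.add s c.1 else s) s)
     PySem.Set.empty,
   (PySem.List.enumerate partition 0).foldl
     (fun (s : PySem.Set Int) ip =>
        ip.2.foldl (fun s c =>
          if pvNf Prod.snd partition c.2 (ip.1 + 1) = 2 then PySem.Set.add s c.2 else s) s)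
     PySem.Set.empty)

-- ===== PRECONDITION & SPEC =====
def Spec_interleaving_rows_and_cols (partition : List (List (Int × Int))) (out : List Int × List Int) : Prop := out = interleaving_rows_and_cols_alt partition
instance (partition : List (List (Int × Int))) (out : List Int × List Int) : Decidable (Spec_interleaving_rows_and_cols partition out) := by unfold Spec_interleaving_rows_and_cols; infer_instance

-- ===== CLAIM (what is proved, stated in full; the proofs are below) =====
def Claim_equal_interleaving_rows_and_cols : Prop := ∀ (partition : List (List (Int × Int))), Dom_interleaving_rows_and_cols partition → Spec_interleaving_rows_and_cols partition (interleaving_rows_and_cols partition)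

-- ===== LEMMAS AND PROOFS =====

-- A's loop body for a single axis (f = the projection of that axis)
def pvStepA (f : Int × Int → Int) (st : PySem.Set Int × PySem.Set Int) (part : List (Int × Int)) :
    PySem.Set Int × PySem.Set Int :=
  (PySem.Set.update st.1 ((part.filter (fun p => PySem.Set.contains st.2 (f p))).map f),
   PySem.Set.update st.2 (part.map f))

-- how many of the listed parts contain coordinate v on axis f
def pvCnt (f : Int × Int → Int) (ps : List (List (Int × Int))) (v : Int) : Nat :=
  ps.countP (fun part => part.any (fun c => f c == v))

lemma pv_any_iff (f : Int × Int → Int) (part : List (Int × Int)) (v : Int) :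
    (part.any (fun c => f c == v)) = true ↔ v ∈ part.map f := by
  simp only [List.any_eq_true, beq_iff_eq, List.mem_map]

lemma pv_foldl_ite_add (p : Int → Prop) [DecidablePred p] :
    ∀ (xs : List Int) (s : PySem.Set Int),
      xs.foldl (fun s v => if p v then PySem.Set.add s v else s) s
        = PySem.Set.update s (xs.filter (fun v => decide (p v))) := by
  intro xs
  induction xs with
  | nil => intro s; rfl
  | cons x xs ih =>
    intro s
    rw [List.foldl_cons, List.filter_cons]
    by_cases h : p x
    · simp only [h, if_true, decide_true, ih, PySem.Set.update_cons]
    · simp only [h, if_false, decide_false, Bool.false_eq_true, ih]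

lemma pv_ofList_filter (xs : List Int) (p : Int → Bool) :
    PySem.Set.ofList (xs.filter p) = (PySem.Set.ofList xs).filter p := by
  induction xs with
  | nil => rfl
  | cons x xs ih =>
    by_cases h : p x
    · simp only [List.filter_cons, h, if_true, PySem.Set.ofList_cons, ih, PySem.Set.discard,
        List.filter_filter]
      exact congrArg (x :: ·) (List.filter_congr (fun y _ => Bool.and_comm _ _))
    · simp only [List.filter_cons, h, Bool.false_eq_true, if_false, PySem.Set.ofList_cons,
        PySem.Set.discard, ih, List.filter_filter]
      refine List.filter_congr ?_
      intro y _; by_cases hy : y = x <;> simp [hy, h]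

lemma pv_update_filter_congr (s : PySem.Set Int) (xs : List Int) (p q : Int → Bool)
    (h : ∀ v ∈ xs, p v = (q v && !(PySem.Set.contains s v))) :
    PySem.Set.update s (xs.filter p) = PySem.Set.update s (xs.filter q) := by
  rw [PySem.Set.update_eq_append_filter, PySem.Set.update_eq_append_filter,
      pv_ofList_filter, pv_ofList_filter, List.filter_filter, List.filter_filter]
  refine congrArg (s ++ ·) (List.filter_congr ?_)
  intro v hv
  rw [h v (by simpa [PySem.Set.mem_ofList] using hv)]
  cases hq : q v <;> cases hd : decide (v ∈ s) <;> simp [hd]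

-- main per-axis lemma: A's incremental fold over the remaining parts equals
-- B's enumerate fold, given the invariants linking A's state to prefix counts
lemma pv_axis (f : Int × Int → Int) :
    ∀ (rest pre : List (List (Int × Int))) (stA : PySem.Set Int × PySem.Set Int)
      (sB : PySem.Set Int),
      stA.1 = sB →
      (∀ x, PySem.Set.contains stA.2 x = true ↔ 1 ≤ pvCnt f pre x) →
      (∀ x, PySem.Set.contains stA.1 x = true ↔ 2 ≤ pvCnt f pre x) →
      (rest.foldl (pvStepA f) stA).1
        = (PySem.List.enumerate rest (pre.length : Int)).foldl
            (fun s ip => ip.2.foldl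
              (fun s c => if pvNf f (pre ++ rest) (f c) (ip.1 + 1) = 2
                          then PySem.Set.add s (f c) else s) s)
            sB := by
  intro rest
  induction rest with
  | nil => intro pre stA sB heq _ _; simpa [PySem.List.enumerate_nil] using heq
  | cons part rest ih =>
    intro pre stA sB heq hseen hcols
    rw [PySem.List.enumerate_cons, List.foldl_cons, List.foldl_cons]
    -- the count over the prefix including `part`
    have hslice : PySem.List.slice (pre ++ part :: rest) none (some ((pre.length : Int) + 1))
        = pre ++ [part] := by
      have : ((pre.length : Int) + 1) = ((pre.length + 1 : Nat) : Int) := by push_cast; ring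
      rw [this, PySem.List.slice_to_natCast, List.append_cons]
      have hlen : pre.length + 1 = (pre ++ [part]).length := by simp
      rw [hlen, List.take_left]
    have hcond : ∀ v, (pvNf f (pre ++ part :: rest) v ((pre.length : Int) + 1) = 2)
        ↔ pvCnt f (pre ++ [part]) v = 2 := by
      intro v
      unfold pvNf pvCnt
      rw [hslice]
      omega
    have hcnt1 : ∀ v, pvCnt f (pre ++ [part]) v
        = pvCnt f pre v + (if v ∈ part.map f then 1 else 0) := by
      intro v
      unfold pvCnt
      rw [List.countP_append]
      by_cases hm : v ∈ part.map f
      · simp [(pv_any_iff f part v).mpr hm, hm]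
      · have : (part.any (fun c => f c == v)) = false :=
          Bool.eq_false_iff.mpr (fun h => hm ((pv_any_iff f part v).mp h))
        simp [this, hm]
    -- the first B step equals A's cols update
    have hinner : part.foldl
        (fun s c => if pvNf f (pre ++ part :: rest) (f c) ((pre.length : Int) + 1) = 2
                    then PySem.Set.add s (f c) else s) sB
        = (pvStepA f stA part).1 := by
      have h1 : part.foldl
          (fun s c => if pvNf f (pre ++ part :: rest) (f c) ((pre.length : Int) + 1) = 2
                      then PySem.Set.add s (f c) else s) sB
          = (part.map f).foldl
              (fun s v => if pvNf f (pre ++ part :: rest) v ((pre.length : Int) + 1) = 2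
                          then PySem.Set.add s v else s) sB := by
        rw [List.foldl_map]
      rw [h1, pv_foldl_ite_add]
      show _ = PySem.Set.update stA.1 ((part.filter (fun p => PySem.Set.contains stA.2 (f p))).map f)
      have hAmap : ((part.filter (fun p => PySem.Set.contains stA.2 (f p))).map f)
          = (part.map f).filter (fun v => PySem.Set.contains stA.2 v) := by
        rw [List.filter_map]; rfl
      rw [hAmap, heq]
      refine pv_update_filter_congr sB (part.map f) _ _ ?_
      intro v hvp
      have e1 : (decide (pvNf f (pre ++ part :: rest) v ((pre.length : Int) + 1) = 2))
          = decide (pvCnt f (pre ++ [part]) v = 2) := by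
        simp only [decide_eq_decide]; exact hcond v
      have e2 : PySem.Set.contains stA.2 v = decide (1 ≤ pvCnt f pre v) := by
        rw [Bool.eq_iff_iff]; simp only [decide_eq_true_eq]; exact hseen v
      have e3 : PySem.Set.contains sB v = decide (2 ≤ pvCnt f pre v) := by
        rw [Bool.eq_iff_iff]; simp only [decide_eq_true_eq]; rw [← heq]; exact hcols v
      rw [e1, e2, e3, hcnt1 v, if_pos hvp]
      by_cases h2 : 2 ≤ pvCnt f pre v
      · rw [decide_eq_false (by omega : ¬ (pvCnt f pre v + 1 = 2)), decide_eq_true h2]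
        simp
      · by_cases hle : 1 ≤ pvCnt f pre v
        · rw [decide_eq_true hle, decide_eq_false h2,
              decide_eq_true (by omega : pvCnt f pre v + 1 = 2)]
          simp
        · rw [decide_eq_false hle, decide_eq_false (by omega : ¬ (pvCnt f pre v + 1 = 2))]
          simp
    rw [hinner]
    -- recurse with pre' = pre ++ [part]
    have hlen' : (pre.length : Int) + 1 = (((pre ++ [part]).length : Nat) : Int) := by
      simp
    have hfull : pre ++ part :: rest = (pre ++ [part]) ++ rest := by
      rw [List.append_cons]
    rw [hlen', hfull]
    refine ih (pre ++ [part]) (pvStepA f stA part) (pvStepA f stA part).1 rfl ?_ ?_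
    · intro v
      show PySem.Set.contains (PySem.Set.update stA.2 (part.map f)) v = true ↔ _
      rw [PySem.Set.contains_iff, PySem.Set.mem_update, hcnt1 v]
      have h1 := hseen v
      rw [PySem.Set.contains_iff] at h1
      by_cases hm : v ∈ part.map f
      · rw [if_pos hm]
        exact ⟨fun _ => by omega, fun _ => Or.inr hm⟩
      · rw [if_neg hm, Nat.add_zero, or_iff_left hm]
        exact h1
    · intro v
      show PySem.Set.contains
          (PySem.Set.update stA.1 ((part.filter (fun p => PySem.Set.contains stA.2 (f p))).map f)) v
          = true ↔ _
      rw [PySem.Set.contains_iff, PySem.Set.mem_update, hcnt1 v]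
      have h2 := hcols v
      rw [PySem.Set.contains_iff] at h2
      have h1 := hseen v
      by_cases hm : v ∈ part.map f
      · rw [if_pos hm]
        simp only [List.mem_map, List.mem_filter]
        constructor
        · rintro (hv | ⟨c, ⟨_, hs⟩, hfc⟩)
          · have := h2.mp hv; omega
          · have : PySem.Set.contains stA.2 v = true := hfc ▸ hs
            have := h1.mp this; omega
        · intro hge
          by_cases hv : v ∈ stA.1
          · exact Or.inl hv
          · obtain ⟨c, hc, hfc⟩ := List.mem_map.mp hm
            refine Or.inr ⟨c, ⟨hc, ?_⟩, hfc⟩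
            rw [hfc, h1]
            have : ¬ 2 ≤ pvCnt f pre v := fun h => hv (h2.mpr h)
            omega
      · rw [if_neg hm, Nat.add_zero]
        simp only [List.mem_map, List.mem_filter]
        constructor
        · rintro (hv | ⟨c, ⟨hc, _⟩, hfc⟩)
          · exact h2.mp hv
          · exact absurd (hfc ▸ List.mem_map_of_mem (f := f) hc) hm
        · intro hge; exact Or.inl (h2.mpr hge)

-- ===== VERDICT (by name: the statement is the Claim_ definition above) =====
theorem interleaving_rows_and_cols_spec : Claim_equal_interleaving_rows_and_cols := by
  intro partition _
  unfold Spec_interleaving_rows_and_cols interleaving_rows_and_cols interleaving_rows_and_cols_alt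
  change ((partition.foldl
      (fun st part => (pvStepA Prod.fst st.1 part, pvStepA Prod.snd st.2 part))
      ((PySem.Set.empty, PySem.Set.empty), (PySem.Set.empty, PySem.Set.empty))).1.1,
    (partition.foldl
      (fun st part => (pvStepA Prod.fst st.1 part, pvStepA Prod.snd st.2 part))
      ((PySem.Set.empty, PySem.Set.empty), (PySem.Set.empty, PySem.Set.empty))).2.1)
    = _
  rw [PySem.List.foldl_prod_mk (f := pvStepA Prod.fst) (g := pvStepA Prod.snd)]
  refine Prod.ext ?_ ?_ <;>
    exact pv_axis _ partition [] (PySem.Set.empty, PySem.Set.empty) PySem.Set.empty rfl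
      (fun x => by simp [PySem.Set.empty, PySem.Set.contains_eq_listContains, pvCnt])
      (fun x => by simp [PySem.Set.empty, PySem.Set.contains_eq_listContains, pvCnt])
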